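-- pv_equiv track=rewrite | github.com/sebastianfym/sis_admin_hh | parser/google_helpers.py | zip_list_with_data
-- ===== SOURCE A (Python) =====
-- def zip_list_with_data(sheet_values):
--     title_list = []
--     value_list = []
--     for index in range(len(sheet_values)):
--         if index % 2 == 0:
--             title_list.append(sheet_values[index])
--         else:
--             value_list.append(sheet_values[index])
--
--     zipped_list = zip(title_list, value_list)
--     return zipped_list
-- ===== SOURCE B (Python) =====
-- def zip_list_with_data(sheet_values):
--     it = iter(sheet_values)
--     return zip(it, it)
-- ===== Notes on version B (the rewrite author's own statement) =====
-- stated objective: idiomatic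
-- what changed: Replaced the index-parity partition into two accumulator lists followed by zip with a single pairwise traversal: one iterator zipped with itself yields the consecutive pairs directly.
import Mathlib
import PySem

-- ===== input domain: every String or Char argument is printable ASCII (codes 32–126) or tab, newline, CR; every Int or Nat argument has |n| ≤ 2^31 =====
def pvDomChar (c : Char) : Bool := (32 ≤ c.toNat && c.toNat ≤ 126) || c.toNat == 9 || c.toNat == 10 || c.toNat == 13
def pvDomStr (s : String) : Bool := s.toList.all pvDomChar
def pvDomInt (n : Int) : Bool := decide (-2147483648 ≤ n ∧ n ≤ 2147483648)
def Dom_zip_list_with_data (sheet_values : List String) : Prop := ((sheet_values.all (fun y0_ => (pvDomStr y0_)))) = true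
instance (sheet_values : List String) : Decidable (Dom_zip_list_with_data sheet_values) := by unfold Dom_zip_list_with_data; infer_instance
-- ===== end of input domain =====

-- B replaces A's even/odd-index partition into two lists + zip by one direct pairwise
-- traversal (iterator zipped with itself); same value, idiomatic decomposition, not faster.

-- ===== PORT A =====
-- for index in range(len(sheet_values)): append sheet_values[index] to title_list or
-- value_list by index parity; the index is always in range, so pyGetD is exact here.
def zip_list_with_data (sheet_values : List String) : List (String × String) :=
  let acc := (PySem.List.pyRange 0 (sheet_values.length : Int) 1).foldl
    (fun (acc : List String × List String) index =>
      if PySem.Int.mod index 2 == 0 then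
        (acc.1 ++ [PySem.List.pyGetD sheet_values index ""], acc.2)
      else
        (acc.1, acc.2 ++ [PySem.List.pyGetD sheet_values index ""]))
    ([], [])
  acc.1.zip acc.2

-- ===== PORT B =====
-- it = iter(sheet_values); zip(it, it): consume the list two elements at a time.
def zip_list_with_data_alt : List String → List (String × String)
  | a :: b :: rest => (a, b) :: zip_list_with_data_alt rest
  | _ => []

-- ===== PRECONDITION & SPEC =====
def Spec_zip_list_with_data (sheet_values : List String) (out : List (String × String)) : Prop := out = zip_list_with_data_alt sheet_values
instance (sheet_values : List String) (out : List (String × String)) : Decidable (Spec_zip_list_with_data sheet_values out) := by unfold Spec_zip_list_with_data; infer_instance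

-- ===== CLAIM (what is proved, stated in full; the proofs are below) =====
def Claim_equal_zip_list_with_data : Prop := ∀ (sheet_values : List String), Dom_zip_list_with_data sheet_values → Spec_zip_list_with_data sheet_values (zip_list_with_data sheet_values)

-- ===== LEMMAS AND PROOFS =====

-- (evens, odds) of a list, swapping at each step
def pvSplit : List String → List String × List String
  | [] => ([], [])
  | a :: r => (a :: (pvSplit r).2, (pvSplit r).1)

theorem pvKey (tail : List String) : ∀ (sv : List String) (k : Nat) (t v : List String),
    tail = sv.drop k →
    (PySem.List.pyRange (k : Int) (sv.length : Int) 1).foldl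
      (fun (acc : List String × List String) index =>
        if PySem.Int.mod index 2 == 0 then
          (acc.1 ++ [PySem.List.pyGetD sv index ""], acc.2)
        else
          (acc.1, acc.2 ++ [PySem.List.pyGetD sv index ""]))
      (t, v)
    = if k % 2 = 0 then (t ++ (pvSplit tail).1, v ++ (pvSplit tail).2)
      else (t ++ (pvSplit tail).2, v ++ (pvSplit tail).1) := by
  induction tail with
  | nil =>
    intro sv k t v hdrop
    have hk : sv.length ≤ k := by
      by_contra h
      push Not at h
      have := List.drop_eq_nil_iff.mp hdrop.symm
      omega
    have : PySem.List.pyRange (k : Int) (sv.length : Int) 1 = [] := by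
      simp [PySem.List.pyRange]
      omega
    rw [this]
    simp [pvSplit]
  | cons a r ih =>
    intro sv k t v hdrop
    have hk : k < sv.length := by
      by_contra h
      push Not at h
      rw [List.drop_eq_nil_of_le h] at hdrop
      simp at hdrop
    have hcons : PySem.List.pyRange (k : Int) (sv.length : Int) 1
        = (k : Int) :: PySem.List.pyRange ((k : Int) + 1) (sv.length : Int) 1 := by
      exact PySem.List.pyRange_one_cons (by exact_mod_cast hk)
    have hget : PySem.List.pyGetD sv (k : Int) "" = a := by
      have h1 : sv[k]? = some a := by
        rw [← List.head?_drop, ← hdrop]; rfl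
      rw [PySem.List.pyGetD_natCast]
      simp [List.getD, h1]
    have hdrop' : r = sv.drop (k + 1) := by
      have := congrArg List.tail hdrop
      simpa [List.tail_drop] using this
    have hmod : PySem.Int.mod (k : Int) 2 = ((k % 2 : Nat) : Int) :=
      PySem.Int.mod_natCast k 2
    rw [hcons]
    simp only [List.foldl_cons, hmod, hget]
    have ihk := ih sv (k + 1) 
    by_cases hpar : k % 2 = 0
    · have : (((k % 2 : Nat) : Int) == 0) = true := by simp [hpar]
      rw [this]
      rw [if_pos rfl]
      have := ihk (t ++ [a]) v hdrop'
      push_cast at this ⊢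
      rw [this]
      have : (k + 1) % 2 = 1 := by omega
      simp [this, pvSplit, hpar]
    · have h1 : k % 2 = 1 := by omega
      have : (((k % 2 : Nat) : Int) == 0) = false := by simp [h1]
      rw [this]
      rw [if_neg (by decide)]
      have := ihk t (v ++ [a]) hdrop'
      push_cast at this ⊢
      rw [this]
      have h2 : (k + 1) % 2 = 0 := by omega
      simp [h2, pvSplit, h1]

theorem pvZipSplit : ∀ l : List String, ((pvSplit l).1).zip (pvSplit l).2 = zip_list_with_data_alt l
  | [] => rfl
  | [_] => rfl
  | a :: b :: r => by simp [pvSplit, zip_list_with_data_alt, pvZipSplit r]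

-- ===== VERDICT (by name: the statement is the Claim_ definition above) =====
theorem zip_list_with_data_spec : Claim_equal_zip_list_with_data := by
  intro sv _
  unfold Spec_zip_list_with_data zip_list_with_data
  have h := pvKey sv sv 0 [] [] (by simp)
  simp only [Nat.cast_zero] at h
  simp only [h]
  simp [pvZipSplit]
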